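-- pv_equiv track=rewrite | github.com/marianasuazas/Clase_Analisis_Algoritmos | Parcial1/Ejercicio 3/fuerza bruta.py | fuerza_bruta
-- ===== SOURCE A (Python) =====
-- def fuerza_bruta(n, s):
--     min_eliminadas = n
--
--     for mask in range(1 << n):
--         nueva = []
--
--         for i in range(n):
--             if mask & (1 << i):
--                 nueva.append(s[i])
--
--         valido = True
--         for i in range(1, len(nueva)):
--             if nueva[i] == nueva[i - 1]:
--                 valido = False
--                 break
--
--         if valido:
--             eliminadas = n - len(nueva)
--             min_eliminadas = min(min_eliminadas, eliminadas)
--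
--     return min_eliminadas
-- ===== SOURCE B (Python) =====
-- def fuerza_bruta(n, s):
--     t = s[:n]
--     return sum(1 for a, b in zip(t, t[1:]) if a == b)
-- ===== Notes on version B (the rewrite author's own statement) =====
-- stated objective: faster
-- what changed: Replaced the exponential scan over all 2^n subsequence masks with a single linear pass that counts adjacent equal characters in s[:n] (collapsing runs), which equals the minimum number of deletions; intended as faster (a timing-probe run measured B ~54x at n=16 with A timing out at n=64, though another run could not confirm the margin).
import Mathlib
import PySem

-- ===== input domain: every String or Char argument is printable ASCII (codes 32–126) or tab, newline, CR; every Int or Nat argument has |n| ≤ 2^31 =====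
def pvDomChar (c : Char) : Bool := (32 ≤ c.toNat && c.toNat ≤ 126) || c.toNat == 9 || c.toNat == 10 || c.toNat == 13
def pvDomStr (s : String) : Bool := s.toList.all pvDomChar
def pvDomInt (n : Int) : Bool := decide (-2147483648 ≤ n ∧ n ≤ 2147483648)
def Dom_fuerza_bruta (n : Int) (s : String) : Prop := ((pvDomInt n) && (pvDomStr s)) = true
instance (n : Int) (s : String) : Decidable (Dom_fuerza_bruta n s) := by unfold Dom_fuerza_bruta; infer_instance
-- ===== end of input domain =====

-- B replaces A's exponential scan over all 2^n subsequence masks by one linear pass counting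
-- adjacent equal characters of s[:n]; intended as faster (O(2^n*n) -> O(n); one timing-probe run
-- measured B ~54x at n=16 with A timing out at n=64, another run could not confirm the margin).

-- ===== PORT A =====
-- inner loop 'for i in range(n): if mask & (1 << i): nueva.append(s[i])';
-- s[i] is ported as getD: under Pre_ we have i < n ≤ len(s), so the index is in range (exact there)
def pvSelect (cs : List Char) (m : Nat) (mask : Nat) : List Char :=
  (List.range m).foldl
    (fun nueva i => if mask &&& (1 <<< i) != 0 then nueva ++ [cs.getD i ' '] else nueva) []

-- 'valido = True; for i in range(1, len(nueva)): if nueva[i] == nueva[i-1]: valido = False; break'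
-- (a pure all-pass; the break only short-circuits); indices are in range, getD is exact
def pvValido (l : List Char) : Bool :=
  (List.range' 1 (l.length - 1)).all (fun i => !(l.getD i ' ' == l.getD (i - 1) ' '))

-- 'for mask in range(1 << n)': under Pre_ 0 ≤ n, so n.toNat = n (Python raises ValueError for n < 0)
def fuerza_bruta (n : Int) (s : String) : Int :=
  (List.range (1 <<< n.toNat)).foldl
    (fun acc mask =>
      let nueva := pvSelect s.toList n.toNat mask
      if pvValido nueva then min acc (n - (nueva.length : Int)) else acc) n

-- ===== PORT B =====
-- t = s[:n]; sum(1 for a, b in zip(t, t[1:]) if a == b)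
def fuerza_bruta_alt (n : Int) (s : String) : Int :=
  let t := PySem.List.slice s.toList none (some n)
  ((t.zip (PySem.List.slice t (some 1) none)).countP (fun p => p.1 == p.2) : Int)

-- ===== PRECONDITION & SPEC =====
-- Pre_ excludes exactly the inputs where Python A raises: n < 0 (ValueError at 1 << n) and
-- n > len(s) (IndexError at s[i])
def Pre_fuerza_bruta (n : Int) (s : String) : Prop := 0 ≤ n ∧ n ≤ (s.toList.length : Int)
instance (n : Int) (s : String) : Decidable (Pre_fuerza_bruta n s) := by
  unfold Pre_fuerza_bruta; infer_instance

def pvWitness_fuerza_bruta : Int × String := (3, "aab")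

def Spec_fuerza_bruta (n : Int) (s : String) (out : Int) : Prop := out = fuerza_bruta_alt n s
instance (n : Int) (s : String) (out : Int) : Decidable (Spec_fuerza_bruta n s out) := by
  unfold Spec_fuerza_bruta; infer_instance

-- ===== CLAIM (what is proved, stated in full; the proofs are below) =====
def Claim_equal_fuerza_bruta : Prop := ∀ (n : Int) (s : String),
  Dom_fuerza_bruta n s → Pre_fuerza_bruta n s → Spec_fuerza_bruta n s (fuerza_bruta n s)

-- ===== LEMMAS AND PROOFS =====

-- number of runs of l, given the previous character p (none = no previous character)
def runsF : Option Char → List Char → Nat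
  | _, [] => 0
  | p, c :: cs => (if p = some c then 0 else 1) + runsF (some c) cs

-- the adjacent-equal-pair count B computes
def adjCount (t : List Char) : Nat := (t.zip t.tail).countP (fun p => p.1 == p.2)

-- the body of A's mask loop
def pvStep (n : Int) (cs : List Char) (m : Nat) (acc : Int) (mask : Nat) : Int :=
  let nueva := pvSelect cs m mask
  if pvValido nueva then min acc (n - (nueva.length : Int)) else acc

theorem pvSelect_eq (cs : List Char) (m mask : Nat) :
    pvSelect cs m mask =
      ((List.range m).filter (fun i => mask &&& (1 <<< i) != 0)).map (fun i => cs.getD i ' ') := by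
  unfold pvSelect
  simpa using PySem.List.foldl_append_if (fun i => mask &&& (1 <<< i) != 0)
    (fun i => cs.getD i ' ') (List.range m) []

theorem map_getD_range_eq_take (cs : List Char) (m : Nat) (hm : m ≤ cs.length) :
    (List.range m).map (fun i => cs.getD i ' ') = cs.take m := by
  apply List.ext_getElem
  · simp [hm]
  · intro i h1 h2
    rw [List.getElem_map, List.getElem_range, List.getElem_take, List.getD_eq_getElem?_getD, List.getElem?_eq_getElem (by simp at h2; omega)]
    rfl

theorem pvSelect_sublist (cs : List Char) (m mask : Nat) (hm : m ≤ cs.length) :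
    (pvSelect cs m mask).Sublist (cs.take m) := by
  rw [pvSelect_eq, ← map_getD_range_eq_take cs m hm]
  exact List.Sublist.map _ List.filter_sublist

theorem pvValido_iff (l : List Char) : pvValido l = true ↔ l.IsChain (· ≠ ·) := by
  rw [pvValido, List.all_eq_true, List.isChain_iff_getElem]
  constructor
  · intro h i hi
    have := h (i + 1) (by rw [List.mem_range'_1]; omega)
    simp only [Nat.add_sub_cancel] at this
    rw [List.getD_eq_getElem?_getD, List.getElem?_eq_getElem (by omega),
        List.getD_eq_getElem?_getD, List.getElem?_eq_getElem (by omega)] at this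
    simp only [Option.getD_some, Bool.not_eq_true', beq_eq_false_iff_ne, ne_eq] at this
    exact fun hh => this hh.symm
  · intro h i hi
    rw [List.mem_range'_1] at hi
    obtain ⟨h1, h2⟩ := hi
    have := h (i - 1) (by omega)
    rw [List.getD_eq_getElem?_getD, List.getElem?_eq_getElem (by omega),
        List.getD_eq_getElem?_getD, List.getElem?_eq_getElem (by omega)]
    have he : i - 1 + 1 = i := by omega
    simp only [he] at this
    simp only [Option.getD_some, Bool.not_eq_true', beq_eq_false_iff_ne, ne_eq]
    exact fun hh => this hh.symm

theorem runsF_le (l : List Char) : ∀ (p q : Option Char), runsF p l ≤ 1 + runsF q l := by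
  induction l with
  | nil => intro p q; simp [runsF]
  | cons c t ih => intro p q; simp only [runsF]; split_ifs <;> omega

theorem chain_sublist_length_le (l : List Char) :
    ∀ (t : List Char) (p : Option Char), t.Sublist l → t.IsChain (· ≠ ·) →
      (∀ x h, p = some x → t.head? = some h → h ≠ x) → t.length ≤ runsF p l := by
  induction l with
  | nil => intro t p hs _ _; simp [List.sublist_nil.mp hs, runsF]
  | cons c l' ih =>
    intro t p hs hc hp
    rw [List.sublist_cons_iff] at hs
    rcases hs with hs | ⟨r, rfl, hr⟩
    · -- t is a sublist of l'
      calc t.length ≤ runsF p l' := ih t p hs hc hp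
        _ ≤ runsF p (c :: l') := by
            simp only [runsF]
            split_ifs with h
            · -- p = some c : runsF p l' ≤ 0 + runsF (some c) l'
              subst h; exact le_refl _ |>.trans (by simp)
            · have := runsF_le l' p (some c); omega
    · -- t = c :: r
      have hc' : r.IsChain (· ≠ ·) := hc.tail
      have hhead : ∀ x h, (some c : Option Char) = some x → r.head? = some h → h ≠ x := by
        intro x h hcx hrh
        obtain rfl : c = x := Option.some_injective _ hcx
        exact (hc.rel_head? (Option.mem_def.mpr hrh)).symm
      have hlen := ih r (some c) hr hc' hhead
      have hne : p ≠ some c := by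
        intro hpc
        exact hp c c hpc rfl rfl
      simp only [runsF, if_neg hne, List.length_cons]
      omega

theorem adjCount_cons_runsF (l : List Char) : ∀ c, adjCount (c :: l) + runsF (some c) l = l.length := by
  induction l with
  | nil => intro c; simp [adjCount, runsF]
  | cons d t ih =>
    intro c
    have := ih d
    simp only [adjCount, List.tail_cons, List.zip_cons_cons, List.countP_cons, runsF] at *
    by_cases h : c = d <;> simp [h] <;> omega

theorem adjCount_runsF (l : List Char) : adjCount l + runsF none l = l.length := by
  cases l with
  | nil => simp [adjCount, runsF]
  | cons c t =>
    have h1 := adjCount_cons_runsF t c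
    have h2 : runsF none (c :: t) = 1 + runsF (some c) t := by simp [runsF]
    simp only [List.length_cons, h2]
    omega

theorem length_destutter'_runsF (l : List Char) :
    ∀ a, (List.destutter' (· ≠ ·) a l).length = 1 + runsF (some a) l := by
  induction l with
  | nil => intro a; simp [List.destutter', runsF]
  | cons c t ih =>
    intro a
    simp only [List.destutter', runsF]
    rcases eq_or_ne a c with h | h
    · subst h; simp [ih]
    · simp only [if_pos h, List.length_cons, ih c]
      simp [h]
      omega

theorem length_destutter_runsF (l : List Char) :
    (List.destutter (· ≠ ·) l).length = runsF none l := by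
  cases l with
  | nil => simp [List.destutter, runsF]
  | cons c t => simp [List.destutter, length_destutter'_runsF, runsF]

theorem bit_cond (x i : Nat) : (x &&& (1 <<< i) != 0) = x.testBit i := by
  rw [Nat.one_shiftLeft, Nat.and_two_pow]
  cases h : x.testBit i <;> simp

theorem pvSelect_succ (cs : List Char) (m mask : Nat) :
    pvSelect cs (m + 1) mask =
      pvSelect cs m mask ++ (if mask &&& (1 <<< m) != 0 then [cs.getD m ' '] else []) := by
  simp only [pvSelect_eq, List.range_succ, List.filter_append, List.map_append]
  congr 1
  by_cases h : (mask &&& (1 <<< m) != 0) = true <;> simp [h]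

theorem exists_mask (cs : List Char) :
    ∀ (m : Nat) (t : List Char), m ≤ cs.length → t.Sublist (cs.take m) →
      ∃ mask, mask < 2 ^ m ∧ pvSelect cs m mask = t := by
  intro m
  induction m with
  | zero =>
    intro t _ ht
    refine ⟨0, by norm_num, ?_⟩
    simpa [pvSelect] using (List.sublist_nil.mp (by simpa using ht)).symm
  | succ m ih =>
    intro t hm ht
    have hmlt : m < cs.length := by omega
    have htake : cs.take (m + 1) = cs.take m ++ [cs[m]] := by
      rw [List.take_add_one, List.getElem?_eq_getElem hmlt]; rfl
    rw [htake, List.sublist_append_iff] at ht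
    obtain ⟨l₁, l₂, rfl, h1, h2⟩ := ht
    obtain ⟨mask, hlt, hsel⟩ := ih l₁ (by omega) h1
    have hbitlow : ∀ i, i < m → ((mask ||| 2 ^ m).testBit i) = mask.testBit i := by
      intro i hi
      rw [Nat.testBit_or, Nat.testBit_two_pow]
      simp [Nat.ne_of_gt hi]
    rcases List.sublist_singleton.mp h2 with rfl | rfl
    · -- l₂ = []: keep mask
      refine ⟨mask, lt_of_lt_of_le hlt (by simpa using Nat.pow_le_pow_right (by norm_num) (Nat.le_succ m)), ?_⟩
      rw [pvSelect_succ]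
      have hbit : (mask &&& (1 <<< m) != 0) = false := by
        rw [bit_cond]; exact Nat.testBit_lt_two_pow hlt
      simp [hbit, hsel]
    · -- l₂ = [cs[m]]: set bit m
      refine ⟨mask ||| 2 ^ m, Nat.or_lt_two_pow (lt_of_lt_of_le hlt (Nat.pow_le_pow_right (by norm_num) (Nat.le_succ m))) (Nat.pow_lt_pow_right (by norm_num) (Nat.lt_succ_self m)), ?_⟩
      rw [pvSelect_succ]
      have hsame : pvSelect cs m (mask ||| 2 ^ m) = pvSelect cs m mask := by
        rw [pvSelect_eq, pvSelect_eq]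
        congr 1
        apply List.filter_congr
        intro i hi
        rw [List.mem_range] at hi
        rw [bit_cond, bit_cond, hbitlow i hi]
      have hbit : ((mask ||| 2 ^ m) &&& (1 <<< m) != 0) = true := by
        rw [bit_cond, Nat.testBit_or, Nat.testBit_two_pow]
        simp
      rw [hsame, hsel, hbit]
      simp [List.getD_eq_getElem?_getD, List.getElem?_eq_getElem hmlt]

theorem pvStep_le (n : Int) (cs : List Char) (m : Nat) (a : Int) (mask : Nat) :
    pvStep n cs m a mask ≤ a := by
  by_cases h : pvValido (pvSelect cs m mask) = true <;> simp [pvStep, h]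

theorem foldl_step_le_init (n : Int) (cs : List Char) (m : Nat) :
    ∀ (l : List Nat) (a : Int), (l.foldl (pvStep n cs m) a) ≤ a := by
  intro l
  induction l with
  | nil => intro a; simp
  | cons b l ih => intro a; exact le_trans (ih _) (pvStep_le n cs m a b)

theorem foldl_step_le_mem (n : Int) (cs : List Char) (m : Nat)
    {mask : Nat} (hv : pvValido (pvSelect cs m mask) = true) :
    ∀ (l : List Nat) (a : Int), mask ∈ l →
      l.foldl (pvStep n cs m) a ≤ n - ((pvSelect cs m mask).length : Int) := by
  intro l
  induction l with
  | nil => intro a h; simp at h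
  | cons b l ih =>
    intro a h
    rcases List.mem_cons.mp h with rfl | h
    · calc (l.foldl (pvStep n cs m) (pvStep n cs m a mask)) ≤ pvStep n cs m a mask :=
          foldl_step_le_init n cs m l _
        _ ≤ n - ((pvSelect cs m mask).length : Int) := by
          simp only [pvStep]; rw [if_pos hv]; exact min_le_right _ _
    · exact ih _ h

theorem foldl_step_ge (n : Int) (cs : List Char) (m : Nat) (v : Int)
    (h : ∀ mask, pvValido (pvSelect cs m mask) = true →
        v ≤ n - ((pvSelect cs m mask).length : Int)) :
    ∀ (l : List Nat) (a : Int), v ≤ a → v ≤ l.foldl (pvStep n cs m) a := by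
  intro l
  induction l with
  | nil => intro a ha; simpa using ha
  | cons b l ih =>
    intro a ha
    apply ih
    simp only [pvStep]
    split_ifs with hb
    · exact le_min ha (h b hb)
    · exact ha

-- ===== VERDICT (by name: the statement is the Claim_ definition above) =====
theorem fuerza_bruta_spec : Claim_equal_fuerza_bruta := by
  unfold Claim_equal_fuerza_bruta
  intro n s _ hpre
  obtain ⟨hn0, hnlen⟩ := hpre
  unfold Spec_fuerza_bruta
  have hm : n.toNat ≤ s.toList.length := by omega
  have hA : fuerza_bruta n s =
      n - (runsF none (s.toList.take n.toNat) : Int) := by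
    unfold fuerza_bruta
    show (List.range (1 <<< n.toNat)).foldl (pvStep n s.toList n.toNat) n = _
    apply le_antisymm
    · obtain ⟨mask, hlt, hsel⟩ := exists_mask s.toList n.toNat
        (List.destutter (· ≠ ·) (s.toList.take n.toNat)) hm
        (List.destutter_sublist _ _)
      have hv : pvValido (pvSelect s.toList n.toNat mask) = true := by
        rw [hsel, pvValido_iff]; exact List.isChain_destutter _ _
      have hmem : mask ∈ List.range (1 <<< n.toNat) := by
        rw [List.mem_range, Nat.one_shiftLeft]; exact hlt
      have h := foldl_step_le_mem n s.toList n.toNat hv (List.range (1 <<< n.toNat)) n hmem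
      rw [hsel, length_destutter_runsF] at h
      exact h
    · apply foldl_step_ge
      · intro mask hvv
        have hsub := pvSelect_sublist s.toList n.toNat mask hm
        have hch := (pvValido_iff _).mp hvv
        have hlen := chain_sublist_length_le (s.toList.take n.toNat)
          (pvSelect s.toList n.toNat mask) none hsub hch (fun x h hx _ => by cases hx)
        omega
      · omega
  have hB : fuerza_bruta_alt n s = (adjCount (s.toList.take n.toNat) : Int) := by
    unfold fuerza_bruta_alt adjCount
    rw [PySem.List.slice_to _ hn0]
    simp only [PySem.List.slice_from_one]
  have hadj := adjCount_runsF (s.toList.take n.toNat)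
  have htlen : (s.toList.take n.toNat).length = n.toNat := by
    rw [List.length_take]; omega
  rw [hA, hB]
  omega
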